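-- pv_equiv track=rewrite | github.com/openstack-archive/murano | conductor/conductor/workflow.py | _get_relative_position
-- ===== SOURCE A (Python) =====
-- def _get_relative_position(path, context):
--     position = context['__dataSource_currentPosition'] or []
--
--     index = 0
--     for c in path:
--         if c == ':':
--             if len(position) > 0:
--                 position = position[:-1]
--         elif c == '/':
--             position = []
--         else:
--             break
--
--         index += 1
--
--     return position, path[index:]
-- ===== SOURCE B (Python) =====
-- def _get_relative_position(path, context):
--     position = context['__dataSource_currentPosition'] or []
--     index = 0
--     while index < len(path) and path[index] in ':/':
--         index += 1
--     if '/' in path[:index]: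
--         position = []
--     else:
--         position = position[:max(len(position) - index, 0)]
--     return position, path[index:]
-- ===== Notes on version B (the rewrite author's own statement) =====
-- stated objective: simpler
-- what changed: Replaces the per-character stack simulation (pop on ':', clear on '/') by a closed form: index is the length of the leading run of ':'/'/' characters; if that prefix contains '/' the position is [], otherwise the position is truncated by the number of prefix characters, floored at 0.
-- outside the precondition, e.g. on _get_relative_position('x', {}): A raises KeyError, B raises KeyError
import Mathlib
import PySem

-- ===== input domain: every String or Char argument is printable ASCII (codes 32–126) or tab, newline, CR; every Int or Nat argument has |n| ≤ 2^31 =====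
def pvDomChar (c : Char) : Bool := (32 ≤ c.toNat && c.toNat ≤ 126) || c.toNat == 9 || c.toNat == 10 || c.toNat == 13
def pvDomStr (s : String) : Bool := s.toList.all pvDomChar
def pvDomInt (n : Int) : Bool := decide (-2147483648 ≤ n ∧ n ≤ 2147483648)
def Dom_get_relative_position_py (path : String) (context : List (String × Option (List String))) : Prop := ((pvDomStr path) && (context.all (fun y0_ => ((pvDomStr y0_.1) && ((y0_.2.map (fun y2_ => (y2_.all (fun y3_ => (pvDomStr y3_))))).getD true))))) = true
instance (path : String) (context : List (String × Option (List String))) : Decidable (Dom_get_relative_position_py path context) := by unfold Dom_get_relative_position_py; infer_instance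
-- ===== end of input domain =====

-- B replaces A's per-character stack simulation with a closed-form prefix computation (objective: simpler).
-- ===== PORT A =====
-- 'position or []': the looked-up value is None -> [], else the list itself ([] stays []).
def pvAInit (context : List (String × Option (List String))) : List String :=
  match PySem.Dict.get? (PySem.Dict.mk context) "__dataSource_currentPosition" with
  | some (some l) => l
  | _ => []

-- the for-loop of A: state (position, index); 'break' stops the loop.
def pvALoop : List Char → List String → Nat → List String × Nat
  | [], pos, i => (pos, i)
  | c :: rest, pos, i =>
    if c = ':' then
      pvALoop rest (if pos.length > 0 then pos.dropLast else pos) (i + 1)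
    else if c = '/' then
      pvALoop rest [] (i + 1)
    else (pos, i)

def get_relative_position_py (path : String) (context : List (String × Option (List String))) : List String × String :=
  let position := pvAInit context
  let r := pvALoop path.toList position 0
  (r.1, String.mk (path.toList.drop r.2))  -- path[index:], 0 ≤ index ≤ len

-- ===== PORT B =====
def get_relative_position_py_alt (path : String) (context : List (String × Option (List String))) : List String × String :=
  let position :=
    match PySem.Dict.get? (PySem.Dict.mk context) "__dataSource_currentPosition" with
    | some (some l) => l
    | _ => []
  let index := (path.toList.takeWhile (fun c => c = ':' || c = '/')).length
  let pos' := if '/' ∈ path.toList.take index then []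
              else position.take (position.length - index)  -- max(len-index,0) is Nat subtraction
  (pos', String.mk (path.toList.drop index))

-- ===== PRECONDITION & SPEC =====
-- A (and B) raise KeyError when the key is absent; Pre_ requires it present.
def Pre_get_relative_position_py (path : String) (context : List (String × Option (List String))) : Prop :=
  "__dataSource_currentPosition" ∈ context.map Prod.fst
instance (path : String) (context : List (String × Option (List String))) : Decidable (Pre_get_relative_position_py path context) := by unfold Pre_get_relative_position_py; infer_instance

def pvWitness_get_relative_position_py : String × (List (String × Option (List String))) :=
  ("::a/b", [("__dataSource_currentPosition", some ["x", "y", "z"])])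

def Spec_get_relative_position_py (path : String) (context : List (String × Option (List String))) (out : List String × String) : Prop := out = get_relative_position_py_alt path context
instance (path : String) (context : List (String × Option (List String))) (out : List String × String) : Decidable (Spec_get_relative_position_py path context out) := by unfold Spec_get_relative_position_py; infer_instance

-- ===== CLAIM (what is proved, stated in full; the proofs are below) =====
def Claim_equal_get_relative_position_py : Prop := ∀ (path : String) (context : List (String × Option (List String))), Dom_get_relative_position_py path context → Pre_get_relative_position_py path context → Spec_get_relative_position_py path context (get_relative_position_py path context)

-- ===== LEMMAS AND PROOFS =====
theorem pvALoop_closed (cs : List Char) : ∀ (pos : List String) (i : Nat),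
    pvALoop cs pos i =
      (let k := (cs.takeWhile (fun c => c = ':' || c = '/')).length
       (if '/' ∈ cs.take k then [] else pos.take (pos.length - k), i + k)) := by
  induction cs with
  | nil => intro pos i; simp [pvALoop, List.takeWhile]
  | cons c rest ih =>
    intro pos i
    by_cases hc : c = ':'
    · subst hc
      have htw : List.takeWhile (fun c : Char => c = ':' || c = '/') (':' :: rest)
          = ':' :: List.takeWhile (fun c : Char => c = ':' || c = '/') rest := by
        simp
      simp only [pvALoop, ih, htw]
      set k' := (rest.takeWhile (fun c : Char => c = ':' || c = '/')).length with hk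
      rw [if_pos trivial]
      simp only [List.length_cons, List.take_succ_cons, List.mem_cons, Prod.mk.injEq]
      by_cases hmem : '/' ∈ rest.take k'
      · rw [if_pos hmem, if_pos (Or.inr hmem)]
        exact ⟨rfl, by omega⟩
      · have hmem2 : ¬(('/' : Char) = ':' ∨ '/' ∈ rest.take k') := by
          rintro (h | h)
          · exact absurd h (by decide)
          · exact hmem h
        rw [if_neg hmem, if_neg hmem2]
        refine ⟨?_, by omega⟩
        by_cases hp : pos.length > 0
        · rw [if_pos hp, List.dropLast_eq_take, List.take_take]
          simp only [List.length_take]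
          congr 1
          omega
        · rw [if_neg hp]
          have hpos : pos = [] := by cases pos <;> simp_all
          subst hpos; simp
    · by_cases hs : c = '/'
      · subst hs
        have htw : List.takeWhile (fun c : Char => c = ':' || c = '/') ('/' :: rest)
            = '/' :: List.takeWhile (fun c : Char => c = ':' || c = '/') rest := by
          simp
        simp only [pvALoop, ih, htw]
        set k' := (rest.takeWhile (fun c : Char => c = ':' || c = '/')).length with hk
        simp only [List.length_cons, List.take_succ_cons, List.mem_cons]
        rw [if_neg (by decide : ¬('/' : Char) = ':'), if_pos (Or.inl trivial)]
        simp only [List.length_nil, List.take_nil, ite_self]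
        rw [if_pos trivial]
        simp only [Prod.mk.injEq]
        exact ⟨trivial, by omega⟩
      · have htw : List.takeWhile (fun c' : Char => c' = ':' || c' = '/') (c :: rest) = [] := by
          simp [hc, hs]
        simp only [pvALoop, if_neg hc, if_neg hs, htw]
        simp

-- ===== VERDICT (by name: the statement is the Claim_ definition above) =====
theorem get_relative_position_py_spec : Claim_equal_get_relative_position_py := by
  intro path context _ _
  unfold Spec_get_relative_position_py get_relative_position_py get_relative_position_py_alt pvAInit
  simp only [pvALoop_closed, Nat.zero_add]
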